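-- pv_equiv track=rewrite | github.com/MrBrantCode/unitest_baseline | mut_generate/mist_train_cf/cf_32344/solution.py | build_dependency_graph
-- ===== SOURCE A (Python) =====
-- def build_dependency_graph(dependencies):
--     dependency_graph = {}
--
--     for module, version in dependencies:
--         if module not in dependency_graph:
--             dependency_graph[module] = []
--
--         for key, value in dependency_graph.items():
--             if key != module:
--                 for index, (ver, deps) in enumerate(value):
--                     if ver == version:
--                         dependency_graph[key][index] = (ver, deps + [module])
--
--         dependency_graph[module].append((version, []))
--
--     return dependency_graph
-- ===== SOURCE B (Python) =====
-- def build_dependency_graph(dependencies):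
--     # Each entry's dependents are exactly the later modules with the same
--     # version (other than the entry's own module), so compute them directly
--     # with one forward scan per entry instead of re-walking the whole graph.
--     graph = {}
--     for i, (module, version) in enumerate(dependencies):
--         later = dependencies[i + 1:]
--         deps = [m for m, v in later if v == version and m != module]
--         graph.setdefault(module, []).append((version, deps))
--     return graph
-- ===== Notes on version B (the rewrite author's own statement) =====
-- stated objective: alternative
-- what changed: Instead of rescanning the whole graph built so far and patching every matching entry after each input pair, B computes each entry's dependent list directly with one forward scan over the remaining input (later modules with the same version), so the graph is written once and never updated.
import Mathlib
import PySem

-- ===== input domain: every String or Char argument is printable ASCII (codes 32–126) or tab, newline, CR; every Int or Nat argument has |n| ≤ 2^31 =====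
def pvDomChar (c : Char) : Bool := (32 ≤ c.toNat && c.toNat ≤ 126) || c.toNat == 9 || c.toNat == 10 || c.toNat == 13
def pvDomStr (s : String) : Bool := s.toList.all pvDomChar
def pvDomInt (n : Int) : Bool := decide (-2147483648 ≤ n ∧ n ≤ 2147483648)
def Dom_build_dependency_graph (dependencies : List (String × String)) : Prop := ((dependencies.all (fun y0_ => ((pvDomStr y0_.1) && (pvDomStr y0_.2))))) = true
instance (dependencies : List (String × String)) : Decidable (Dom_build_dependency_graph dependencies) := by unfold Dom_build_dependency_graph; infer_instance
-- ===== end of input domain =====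

-- B replaces A's repeated rescan-and-patch of the whole accumulated graph by one forward scan
-- of the remaining input per entry (alternative decomposition; measured constant-factor speed-up).

abbrev pvDG := PySem.Dict String (List (String × List String))

-- ===== PORT A =====
-- loop body of A's 'for module, version in dependencies' (named helper; code is the literal loop body)
def pvStepA (dg : pvDG) (mv : String × String) : pvDG :=
  -- if module not in dependency_graph: dependency_graph[module] = []
  let dg := if dg.contains mv.1 = false then dg.insert mv.1 [] else dg
  -- for key, value in dependency_graph.items(): …
  let dg := dg.items.foldl (fun acc kv =>
      if kv.1 ≠ mv.1 then
        -- for index, (ver, deps) in enumerate(value): if ver == version: dependency_graph[key][index] = (ver, deps + [module])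
        (PySem.List.enumerate kv.2).foldl (fun acc2 ie =>
          if ie.2.1 = mv.2 then
            acc2.insert kv.1 (PySem.List.pySetD (acc2.getD kv.1 []) ie.1 (ie.2.1, ie.2.2 ++ [mv.1]))
          else acc2) acc
      else acc) dg
  -- dependency_graph[module].append((version, []))
  dg.modify mv.1 [] (fun lst => lst ++ [(mv.2, [])])

def build_dependency_graph (dependencies : List (String × String)) : List (String × List (String × List String)) :=
  (dependencies.foldl pvStepA PySem.Dict.empty).items

-- ===== PORT B =====
-- loop body of B's 'for i, (module, version) in enumerate(dependencies)' (named helper; code is the literal loop body)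
def pvStepB (dependencies : List (String × String)) (graph : pvDG) (imv : Int × (String × String)) : pvDG :=
  -- later = dependencies[i + 1:]
  let later := PySem.List.slice dependencies (some (imv.1 + 1)) none
  -- deps = [m for m, v in later if v == version and m != module]
  let deps := (later.filter (fun p => p.2 == imv.2.2 && p.1 != imv.2.1)).map (fun p => p.1)
  -- graph.setdefault(module, []).append((version, deps))
  (graph.setdefault imv.2.1 []).modify imv.2.1 [] (fun lst => lst ++ [(imv.2.2, deps)])

def build_dependency_graph_alt (dependencies : List (String × String)) : List (String × List (String × List String)) :=
  ((PySem.List.enumerate dependencies).foldl (pvStepB dependencies) PySem.Dict.empty).items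

-- ===== PRECONDITION & SPEC =====
def Spec_build_dependency_graph (dependencies : List (String × String)) (out : List (String × List (String × List String))) : Prop := out = build_dependency_graph_alt dependencies
instance (dependencies : List (String × String)) (out : List (String × List (String × List String))) : Decidable (Spec_build_dependency_graph dependencies out) := by unfold Spec_build_dependency_graph; infer_instance

-- ===== CLAIM (what is proved, stated in full; the proofs are below) =====
def Claim_equal_build_dependency_graph : Prop := ∀ (dependencies : List (String × String)), Dom_build_dependency_graph dependencies → Spec_build_dependency_graph dependencies (build_dependency_graph dependencies)

-- ===== LEMMAS AND PROOFS =====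

-- 'deps + [module]' applied to one (version, deps) entry when the version matches
def pvBump (m v : String) (e : String × List String) : String × List String :=
  if e.1 = v then (e.1, e.2 ++ [m]) else e

-- the modules of todo with version ver, own module k excluded (B's comprehension, generalised)
def pvScan (todo : List (String × String)) (ver k : String) : List String :=
  (todo.filter (fun p => p.2 == ver && p.1 != k)).map (fun p => p.1)

-- A's loop body re-expressed as three structural maps over the items list
def pvStepC (dg : pvDG) (m v : String) : pvDG :=
  let dg1 : pvDG := if dg.contains m then dg else ⟨dg.items ++ [(m, [])]⟩
  let dg2 : pvDG := ⟨dg1.items.map (fun p => if p.1 = m then p else (p.1, p.2.map (pvBump m v)))⟩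
  ⟨dg2.items.map (fun p => if p.1 = m then (p.1, p.2 ++ [(v, [])]) else p)⟩

-- B's step: append one finished entry under its module key
def pvPush (dg : pvDG) (m : String) (e : String × List String) : pvDG :=
  if dg.contains m then ⟨dg.items.map (fun p => if p.1 = m then (p.1, p.2 ++ [e]) else p)⟩
  else ⟨dg.items ++ [(m, [e])]⟩

-- B's loop as structural recursion on the remaining input
def pvBcore (dg : pvDG) : List (String × String) → pvDG
  | [] => dg
  | (m, v) :: rest => pvBcore (pvPush dg m (v, pvScan rest v m)) rest

-- simulation transform: extend every entry of dg by the future matches from todo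
def pvT (todo : List (String × String)) (dg : pvDG) : pvDG :=
  ⟨dg.items.map (fun p => (p.1, p.2.map (fun e => (e.1, e.2 ++ pvScan todo e.1 p.1))))⟩

-- A's inner index loop as a recursion on the snapshot entry list
def pvUpdTo (m v : String) : List (String × List String) → List (String × List String) → Int → List (String × List String)
  | lst, [], _ => lst
  | lst, e :: es, i =>
      pvUpdTo m v (if e.1 = v then PySem.List.pySetD lst i (e.1, e.2 ++ [m]) else lst) es (i + 1)

lemma pvScan_cons (m v ver k : String) (rest : List (String × String)) :
    pvScan ((m, v) :: rest) ver k
      = (if v = ver ∧ m ≠ k then [m] else []) ++ pvScan rest ver k := by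
  by_cases h1 : v = ver <;> by_cases h2 : m = k <;>
    simp [pvScan, h1, h2]

lemma pvT_nil (dg : pvDG) : pvT [] dg = dg := by
  obtain ⟨l⟩ := dg
  simp [pvT, pvScan]

lemma pvContains_mk_map (l : List (String × List (String × List String)))
    (g : String × List (String × List String) → String × List (String × List String))
    (hg : ∀ p, (g p).1 = p.1) (k : String) :
    (PySem.Dict.mk (l.map g)).contains k = (PySem.Dict.mk l).contains k := by
  simp [PySem.Dict.contains, List.any_map, Function.comp_def, hg]

lemma pvNotContains_iff (d : pvDG) (m : String) :
    d.contains m = false ↔ ∀ p ∈ d.items, p.1 ≠ m := by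
  simp [PySem.Dict.contains, List.any_eq_false]

lemma pvNotMemKeys (d : pvDG) (m : String) (h : d.contains m = false) : m ∉ d.keys := by
  rw [pvNotContains_iff] at h
  simp only [PySem.Dict.keys, List.mem_map]
  rintro ⟨p, hp, rfl⟩
  exact h p hp rfl

lemma pvKeys_mk_map (l : List (String × List (String × List String)))
    (g : String × List (String × List String) → String × List (String × List String))
    (hg : ∀ p, (g p).1 = p.1) :
    (PySem.Dict.mk (l.map g) : pvDG).keys = (PySem.Dict.mk l : pvDG).keys := by
  simp only [PySem.Dict.keys, List.map_map]
  exact List.map_congr_left fun p _ => hg p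

lemma pvRepl (d : pvDG) (k : String) (w : List (String × List String))
    (g : List (String × List String) → List (String × List String))
    (hnd : d.keys.Nodup) (hw : d.get? k = some w) :
    d.insert k (g w) = ⟨d.items.map (fun p => if p.1 = k then (p.1, g p.2) else p)⟩ := by
  have hc : d.contains k = true := by
    rw [PySem.Dict.contains_eq_isSome_get?, hw]; rfl
  simp only [PySem.Dict.insert, hc, if_pos]
  congr 1
  refine List.map_congr_left fun p hp => ?_
  by_cases hpk : p.1 = k
  · obtain ⟨pk, pv⟩ := p
    simp only at hpk
    subst hpk
    have h2 := PySem.Dict.get?_of_mem_items d hp hnd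
    rw [hw] at h2
    injection h2 with h2
    simp [h2]
  · simp [hpk]

lemma pvInsert_getD_self (d : pvDG) (k : String) (w : List (String × List String))
    (hnd : d.keys.Nodup) (hw : d.get? k = some w) :
    d.insert k w = d := by
  have := pvRepl d k w id hnd hw
  simp only [id] at this
  rw [this]
  obtain ⟨l⟩ := d
  simp

lemma pvInnerFold (m v k : String) :
    ∀ (es : List (String × List String)) (i0 : Int) (acc : pvDG),
      acc.keys.Nodup → acc.contains k = true →
      (PySem.List.enumerate es i0).foldl (fun acc2 ie =>
          if ie.2.1 = v then
            acc2.insert k (PySem.List.pySetD (acc2.getD k []) ie.1 (ie.2.1, ie.2.2 ++ [m]))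
          else acc2) acc
        = acc.insert k (pvUpdTo m v (acc.getD k []) es i0) := by
  intro es
  induction es with
  | nil =>
    intro i0 acc hnd hc
    rw [PySem.Dict.contains_eq_isSome_get?] at hc
    obtain ⟨w, hw⟩ := Option.isSome_iff_exists.mp hc
    simp only [PySem.List.enumerate_nil, List.foldl_nil, pvUpdTo]
    rw [PySem.Dict.getD_eq_get?_getD, hw]
    exact (pvInsert_getD_self acc k w hnd hw).symm
  | cons e es ih =>
    intro i0 acc hnd hc
    rw [PySem.List.enumerate_cons, List.foldl_cons]
    simp only [pvUpdTo]
    by_cases hv : e.1 = v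
    · simp only [if_pos hv]
      have hc' : (acc.insert k (PySem.List.pySetD (acc.getD k []) i0 (e.1, e.2 ++ [m]))).contains k = true := by
        rw [PySem.Dict.contains_insert]; simp
      have hnd' : (acc.insert k (PySem.List.pySetD (acc.getD k []) i0 (e.1, e.2 ++ [m]))).keys.Nodup := by
        have hck : acc.contains k = true := hc
        rw [PySem.Dict.keys_insert_of_contains acc _ hck]; exact hnd
      rw [ih (i0 + 1) _ hnd' hc']
      rw [PySem.Dict.getD_insert_self, PySem.Dict.insert_insert_self]
    · simp only [if_neg hv]
      exact ih (i0 + 1) acc hnd hc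

lemma pvUpdTo_spec (m v : String) :
    ∀ (es pre : List (String × List String)),
      pvUpdTo m v (pre ++ es) es (pre.length : Int) = pre ++ es.map (pvBump m v) := by
  intro es
  induction es with
  | nil => intro pre; simp [pvUpdTo]
  | cons e es ih =>
    intro pre
    simp only [pvUpdTo, List.map_cons]
    have hset : PySem.List.pySetD (pre ++ e :: es) (pre.length : Int) (e.1, e.2 ++ [m])
        = pre ++ (e.1, e.2 ++ [m]) :: es := by
      rw [PySem.List.pySetD_natCast]; simp
    have harr : ((pre.length : Int) + 1) = ((pre ++ [pvBump m v e]).length : Int) := by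
      simp
    by_cases hv : e.1 = v
    · rw [if_pos hv, hset]
      have : pre ++ (e.1, e.2 ++ [m]) :: es = (pre ++ [pvBump m v e]) ++ es := by
        simp [pvBump, hv]
      rw [this, harr, ih]
      simp [pvBump, hv]
    · rw [if_neg hv]
      have : pre ++ e :: es = (pre ++ [pvBump m v e]) ++ es := by
        simp [pvBump, hv]
      rw [this, harr, ih]
      simp [pvBump, hv]

lemma pvOuterFold (m v : String) :
    ∀ (l : List (String × List (String × List String))) (acc : pvDG),
      acc.keys.Nodup → (l.map Prod.fst).Nodup →
      (∀ p ∈ l, acc.get? p.1 = some p.2) →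
      l.foldl (fun acc kv =>
          if kv.1 ≠ m then
            (PySem.List.enumerate kv.2).foldl (fun acc2 ie =>
              if ie.2.1 = v then
                acc2.insert kv.1 (PySem.List.pySetD (acc2.getD kv.1 []) ie.1 (ie.2.1, ie.2.2 ++ [m]))
              else acc2) acc
          else acc) acc
        = ⟨acc.items.map (fun p =>
            if p.1 ≠ m ∧ p.1 ∈ l.map Prod.fst then (p.1, p.2.map (pvBump m v)) else p)⟩ := by
  intro l
  induction l with
  | nil =>
    intro acc _ _ _
    obtain ⟨items⟩ := acc
    simp
  | cons kv l ih =>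
    intro acc hnd hfst hget
    have hkv1 : kv.1 ∉ l.map Prod.fst := by
      rw [List.map_cons] at hfst
      exact (List.nodup_cons.mp hfst).1
    have hfst' : (l.map Prod.fst).Nodup := by
      rw [List.map_cons] at hfst
      exact (List.nodup_cons.mp hfst).2
    simp only [List.foldl_cons]
    by_cases hkm : kv.1 = m
    · rw [if_neg (by simp [hkm])]
      rw [ih acc hnd hfst' (fun p hp => hget p (List.mem_cons_of_mem _ hp))]
      congr 1
      refine List.map_congr_left fun p hp => ?_
      by_cases hpm : p.1 = m
      · simp [hpm]
      · by_cases hin : p.1 ∈ List.map Prod.fst l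
        · rw [if_pos ⟨hpm, hin⟩, if_pos ⟨hpm, List.mem_cons_of_mem _ hin⟩]
        · rw [if_neg (by simp [hin]), if_neg (by simp [List.mem_cons, hin, hkm, hpm])]
    · rw [if_pos hkm]
      have hgkv : acc.get? kv.1 = some kv.2 := hget kv (List.mem_cons_self)
      have hcont : acc.contains kv.1 = true := by
        rw [PySem.Dict.contains_eq_isSome_get?, hgkv]; rfl
      rw [pvInnerFold m v kv.1 kv.2 0 acc hnd hcont]
      rw [PySem.Dict.getD_eq_get?_getD, hgkv, Option.getD_some]
      have hupd := pvUpdTo_spec m v kv.2 []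
      simp only [List.nil_append, List.length_nil, Nat.cast_zero] at hupd
      rw [hupd]
      have hacc' : acc.insert kv.1 (kv.2.map (pvBump m v))
          = ⟨acc.items.map (fun p => if p.1 = kv.1 then (p.1, p.2.map (pvBump m v)) else p)⟩ :=
        pvRepl acc kv.1 kv.2 (fun w => w.map (pvBump m v)) hnd hgkv
      have hnd' : (acc.insert kv.1 (kv.2.map (pvBump m v))).keys.Nodup := by
        rw [PySem.Dict.keys_insert_of_contains acc _ hcont]; exact hnd
      have hget' : ∀ p ∈ l, (acc.insert kv.1 (kv.2.map (pvBump m v))).get? p.1 = some p.2 := by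
        intro p hp
        have hne : p.1 ≠ kv.1 := fun h => hkv1 (h ▸ List.mem_map_of_mem hp)
        rw [PySem.Dict.get?_insert_of_ne acc _ hne]
        exact hget p (List.mem_cons_of_mem _ hp)
      rw [ih _ hnd' hfst' hget', hacc']
      congr 1
      simp only [List.map_map]
      refine List.map_congr_left fun p hp => ?_
      simp only [Function.comp_def]
      by_cases hpk : p.1 = kv.1
      · have hpm : ¬ p.1 = m := fun h => hkm (hpk ▸ h)
        have hnotl : p.1 ∉ l.map Prod.fst := hpk ▸ hkv1
        rw [if_pos hpk]
        rw [if_neg (by simp [hpm, hnotl])]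
        rw [if_pos ⟨hpm, by simp [List.mem_cons, hpk]⟩]
      · rw [if_neg hpk]
        by_cases hpm : p.1 = m
        · rw [if_neg (by simp [hpm]), if_neg (by simp [hpm])]
        · by_cases hin : p.1 ∈ List.map Prod.fst l
          · rw [if_pos ⟨hpm, hin⟩, if_pos ⟨hpm, List.mem_cons_of_mem _ hin⟩]
          · rw [if_neg (by simp [hin]), if_neg (by simp [List.mem_cons, hpk, hin])]

lemma pvStepA_eq_stepC (dg : pvDG) (m v : String) (hnd : dg.keys.Nodup) :
    pvStepA dg (m, v) = pvStepC dg m v := by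
  unfold pvStepA pvStepC
  simp only
  have h1 : (if dg.contains m = false then dg.insert m [] else dg)
      = (if dg.contains m then dg else (⟨dg.items ++ [(m, [])]⟩ : pvDG)) := by
    by_cases hc : dg.contains m
    · simp [hc]
    · have hc' : dg.contains m = false := by simpa using hc
      simp [hc', PySem.Dict.insert]
  rw [h1]
  have hnd1 : (if dg.contains m then dg else (⟨dg.items ++ [(m, [])]⟩ : pvDG)).keys.Nodup := by
    by_cases hc : dg.contains m
    · simpa [hc]
    · simp only [hc, Bool.false_eq_true, ite_false]
      have hm := pvNotMemKeys dg m (by simpa using hc)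
      simp only [PySem.Dict.keys, List.map_append, List.map_cons, List.map_nil, List.nodup_append]
      refine ⟨hnd, List.nodup_singleton m, ?_⟩
      intro a ha b hb
      rw [List.mem_singleton] at hb
      subst hb
      exact fun h => hm (h ▸ ha)
  have hcont1 : (if dg.contains m then dg else (⟨dg.items ++ [(m, [])]⟩ : pvDG)).contains m = true := by
    by_cases hc : dg.contains m
    · simpa [hc]
    · simp only [hc, Bool.false_eq_true, ite_false]
      simp [PySem.Dict.contains, List.any_append]
  rw [pvOuterFold m v _ _ hnd1 hnd1 (fun p hp => PySem.Dict.get?_of_mem_items _ hp hnd1)]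
  have h2 : ((⟨(if dg.contains m then dg else (⟨dg.items ++ [(m, [])]⟩ : pvDG)).items.map
        (fun p => if p.1 ≠ m ∧ p.1 ∈ (if dg.contains m then dg else (⟨dg.items ++ [(m, [])]⟩ : pvDG)).items.map Prod.fst
          then (p.1, p.2.map (pvBump m v)) else p)⟩ : pvDG))
      = ⟨(if dg.contains m then dg else (⟨dg.items ++ [(m, [])]⟩ : pvDG)).items.map
        (fun p => if p.1 = m then p else (p.1, p.2.map (pvBump m v)))⟩ := by
    congr 1
    refine List.map_congr_left fun p hp => ?_
    by_cases hpm : p.1 = m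
    · rw [if_neg (by simp [hpm]), if_pos hpm]
    · rw [if_pos ⟨hpm, List.mem_map_of_mem hp⟩, if_neg hpm]
  rw [h2]
  have hk2 : ((⟨(if dg.contains m then dg else (⟨dg.items ++ [(m, [])]⟩ : pvDG)).items.map
        (fun p => if p.1 = m then p else (p.1, p.2.map (pvBump m v)))⟩ : pvDG)).keys
      = (if dg.contains m then dg else (⟨dg.items ++ [(m, [])]⟩ : pvDG)).keys := by
    rw [pvKeys_mk_map _ _ (fun p => by by_cases h : p.1 = m <;> simp [h])]
  have hnd2 : ((⟨(if dg.contains m then dg else (⟨dg.items ++ [(m, [])]⟩ : pvDG)).items.map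
        (fun p => if p.1 = m then p else (p.1, p.2.map (pvBump m v)))⟩ : pvDG)).keys.Nodup := by
    rw [hk2]; exact hnd1
  have hcont2 : ((⟨(if dg.contains m then dg else (⟨dg.items ++ [(m, [])]⟩ : pvDG)).items.map
        (fun p => if p.1 = m then p else (p.1, p.2.map (pvBump m v)))⟩ : pvDG)).contains m = true := by
    rw [pvContains_mk_map _ _ (fun p => by by_cases h : p.1 = m <;> simp [h])]
    exact hcont1
  have hsome2 := hcont2
  rw [PySem.Dict.contains_eq_isSome_get?] at hsome2
  obtain ⟨w2, hw2⟩ := Option.isSome_iff_exists.mp hsome2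
  unfold PySem.Dict.modify
  rw [PySem.Dict.getD_eq_get?_getD, hw2, Option.getD_some]
  rw [pvRepl _ m w2 (fun lst => lst ++ [(v, [])]) hnd2 hw2]

lemma pvKeys_stepC (dg : pvDG) (m v : String) :
    (pvStepC dg m v).keys = if dg.contains m then dg.keys else dg.keys ++ [m] := by
  unfold pvStepC
  rw [pvKeys_mk_map _ _ (fun p => by by_cases h : p.1 = m <;> simp [h])]
  rw [pvKeys_mk_map _ _ (fun p => by by_cases h : p.1 = m <;> simp [h])]
  by_cases hc : dg.contains m
  · simp only [hc, if_pos]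
  · simp only [hc, Bool.false_eq_true, ite_false]
    simp [PySem.Dict.keys]

lemma pvNodup_stepC (dg : pvDG) (m v : String) (hnd : dg.keys.Nodup) :
    (pvStepC dg m v).keys.Nodup := by
  rw [pvKeys_stepC]
  by_cases hc : dg.contains m
  · simpa [hc] using hnd
  · simp only [hc, Bool.false_eq_true, ite_false]
    have := pvNotMemKeys dg m (by simpa using hc)
    simp only [List.nodup_append]
    refine ⟨hnd, List.nodup_singleton m, ?_⟩
    intro a ha b hb
    rw [List.mem_singleton] at hb
    subst hb
    exact fun h => this (h ▸ ha)

lemma pvKeys_push (dg : pvDG) (m : String) (e : String × List String) :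
    (pvPush dg m e).keys = if dg.contains m then dg.keys else dg.keys ++ [m] := by
  unfold pvPush
  by_cases hc : dg.contains m
  · simp only [hc, if_pos]
    rw [pvKeys_mk_map dg.items (fun p => if p.1 = m then (p.1, p.2 ++ [e]) else p)
      (fun p => by by_cases h : p.1 = m <;> simp [h])]
  · simp only [hc, Bool.false_eq_true, ite_false]
    simp [PySem.Dict.keys]

lemma pvNodup_push (dg : pvDG) (m : String) (e : String × List String) (hnd : dg.keys.Nodup) :
    (pvPush dg m e).keys.Nodup := by
  rw [pvKeys_push]
  by_cases hc : dg.contains m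
  · simpa [hc] using hnd
  · simp only [hc, Bool.false_eq_true, ite_false]
    have := pvNotMemKeys dg m (by simpa using hc)
    simp only [List.nodup_append]
    refine ⟨hnd, List.nodup_singleton m, ?_⟩
    intro a ha b hb
    rw [List.mem_singleton] at hb
    subst hb
    exact fun h => this (h ▸ ha)

lemma pvContains_T (todo : List (String × String)) (dg : pvDG) (m : String) :
    (pvT todo dg).contains m = dg.contains m := by
  unfold pvT
  rw [pvContains_mk_map dg.items
    (fun p => (p.1, p.2.map (fun e => (e.1, e.2 ++ pvScan todo e.1 p.1)))) (fun p => rfl)]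

lemma pvPoint_ne (m v : String) (rest : List (String × String))
    (p : String × List (String × List String)) (hpm : p.1 ≠ m) :
    (p.1, (p.2.map (pvBump m v)).map (fun e => (e.1, e.2 ++ pvScan rest e.1 p.1)))
      = (p.1, p.2.map (fun e => (e.1, e.2 ++ pvScan ((m, v) :: rest) e.1 p.1))) := by
  have hmp : m ≠ p.1 := fun h => hpm h.symm
  refine congrArg (Prod.mk p.1) ?_
  simp only [List.map_map]
  refine List.map_congr_left fun e _ => ?_
  by_cases he : e.1 = v
  · simp [pvBump, he, pvScan_cons, hmp]
  · simp [pvBump, he, pvScan_cons, (show ¬v = e.1 from fun h => he h.symm)]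

lemma pvStepS (m v : String) (rest : List (String × String)) (dg : pvDG) :
    pvT rest (pvStepC dg m v) = pvPush (pvT ((m, v) :: rest) dg) m (v, pvScan rest v m) := by
  have hpush : ∀ (X : pvDG), X.contains m = dg.contains m →
      pvPush X m (v, pvScan rest v m)
        = if dg.contains m then
            (⟨X.items.map (fun p => if p.1 = m then (p.1, p.2 ++ [(v, pvScan rest v m)]) else p)⟩ : pvDG)
          else ⟨X.items ++ [(m, [(v, pvScan rest v m)])]⟩ := by
    intro X hX
    unfold pvPush
    rw [hX]
  rw [hpush _ (pvContains_T _ dg m)]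
  by_cases hc : dg.contains m
  · simp only [hc, if_pos]
    unfold pvStepC pvT
    simp only [hc, if_pos, List.map_map]
    congr 1
    refine List.map_congr_left fun p _ => ?_
    simp only [Function.comp_def]
    by_cases hpm : p.1 = m
    · simp only [if_pos hpm]
      refine congrArg (Prod.mk p.1) ?_
      rw [List.map_append]
      congr 1
      · refine List.map_congr_left fun e _ => ?_
        simp [pvScan_cons, hpm]
      · simp [hpm]
    · simp only [if_neg hpm]
      exact pvPoint_ne m v rest p hpm
  · simp only [hc, Bool.false_eq_true, ite_false]
    unfold pvStepC pvT
    simp only [hc, Bool.false_eq_true, ite_false, List.map_map, List.map_append]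
    congr 1
    congr 1
    · refine List.map_congr_left fun p hp => ?_
      have hpm : p.1 ≠ m := (pvNotContains_iff dg m).mp (by simpa using hc) p hp
      simp only [Function.comp_def, if_neg hpm]
      exact pvPoint_ne m v rest p hpm
    · simp

lemma pvMain : ∀ (todo : List (String × String)) (dg : pvDG),
    todo.foldl (fun d mv => pvStepC d mv.1 mv.2) dg = pvBcore (pvT todo dg) todo := by
  intro todo
  induction todo with
  | nil => intro dg; simp [pvBcore, pvT_nil]
  | cons mv rest ih =>
    intro dg
    obtain ⟨m, v⟩ := mv
    rw [List.foldl_cons]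
    have := ih (pvStepC dg m v)
    simp only at this
    rw [this, pvStepS]
    simp [pvBcore]

lemma pvAfold : ∀ (l : List (String × String)) (dg : pvDG), dg.keys.Nodup →
    l.foldl pvStepA dg = l.foldl (fun d mv => pvStepC d mv.1 mv.2) dg := by
  intro l
  induction l with
  | nil => intro dg _; rfl
  | cons mv l ih =>
    intro dg hnd
    obtain ⟨m, v⟩ := mv
    rw [List.foldl_cons, List.foldl_cons, pvStepA_eq_stepC dg m v hnd]
    exact ih _ (pvNodup_stepC dg m v hnd)

lemma pvSetMod (g : pvDG) (m : String) (e : String × List String) (hnd : g.keys.Nodup) :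
    (g.setdefault m []).modify m [] (fun lst => lst ++ [e]) = pvPush g m e := by
  by_cases hc : g.contains m
  · rw [show g.setdefault m [] = g from by simp [PySem.Dict.setdefault, hc]]
    have hsome : (g.get? m).isSome := by
      rw [← PySem.Dict.contains_eq_isSome_get? g m]; exact hc
    obtain ⟨w, hw⟩ := Option.isSome_iff_exists.mp hsome
    unfold PySem.Dict.modify
    rw [PySem.Dict.getD_eq_get?_getD, hw]
    simp only [Option.getD_some]
    rw [pvRepl g m w (fun lst => lst ++ [e]) hnd hw]
    unfold pvPush
    rw [if_pos hc]
  · have hsd : g.setdefault m [] = (⟨g.items ++ [(m, [])]⟩ : pvDG) := by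
      simp [PySem.Dict.setdefault, hc]
    have hne : ∀ p ∈ g.items, p.1 ≠ m := (pvNotContains_iff g m).mp (by simpa using hc)
    have hget : (⟨g.items ++ [(m, [])]⟩ : pvDG).get? m = some [] := by
      unfold PySem.Dict.get?
      rw [List.find?_append]
      have h1 : g.items.find? (fun p => p.1 == m) = none := by
        rw [List.find?_eq_none]
        intro p hp
        simpa using hne p hp
      rw [h1]
      simp
    have hnd1 : (⟨g.items ++ [(m, [])]⟩ : pvDG).keys.Nodup := by
      have hm := pvNotMemKeys g m (by simpa using hc)
      simp only [PySem.Dict.keys, List.map_append, List.map_cons, List.map_nil,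
        List.nodup_append]
      refine ⟨hnd, List.nodup_singleton m, ?_⟩
      intro a ha b hb
      rw [List.mem_singleton] at hb
      subst hb
      exact fun h => hm (h ▸ ha)
    rw [hsd]
    unfold PySem.Dict.modify
    rw [PySem.Dict.getD_eq_get?_getD, hget]
    simp only [Option.getD_some]
    rw [pvRepl _ m [] (fun lst => lst ++ [e]) hnd1 hget]
    unfold pvPush
    rw [if_neg (by simpa using hc)]
    congr 1
    rw [List.map_append]
    congr 1
    · refine (List.map_congr_left fun p hp => ?_).trans (List.map_id _)
      simp [hne p hp]
    · simp

lemma pvBfold (deps : List (String × String)) :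
    ∀ (rest : List (String × String)) (j0 : Nat) (g : pvDG), g.keys.Nodup →
      rest = deps.drop j0 →
      (PySem.List.enumerate rest (j0 : Int)).foldl (pvStepB deps) g = pvBcore g rest := by
  intro rest
  induction rest with
  | nil => intro j0 g _ _; simp [PySem.List.enumerate_nil, pvBcore]
  | cons mv rest ih =>
    intro j0 g hnd hdrop
    obtain ⟨m, v⟩ := mv
    rw [PySem.List.enumerate_cons, List.foldl_cons]
    have hrest : rest = deps.drop (j0 + 1) := by
      rw [← List.tail_drop, ← hdrop, List.tail_cons]
    have hstep : pvStepB deps g ((j0 : Int), (m, v)) = pvPush g m (v, pvScan rest v m) := by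
      unfold pvStepB
      simp only
      rw [show ((j0 : Int) + 1) = ((j0 + 1 : Nat) : Int) by push_cast; ring]
      rw [PySem.List.slice_from_natCast, ← hrest]
      exact pvSetMod g m (v, pvScan rest v m) hnd
    rw [hstep]
    rw [show ((j0 : Int) + 1) = ((j0 + 1 : Nat) : Int) by push_cast; ring]
    rw [ih (j0 + 1) _ (pvNodup_push g m _ hnd) hrest]
    simp [pvBcore]

-- ===== VERDICT (by name: the statement is the Claim_ definition above) =====
theorem build_dependency_graph_spec : Claim_equal_build_dependency_graph := by
  intro deps _
  unfold Spec_build_dependency_graph build_dependency_graph build_dependency_graph_alt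
  have h1 := pvAfold deps PySem.Dict.empty (by simp [PySem.Dict.empty, PySem.Dict.keys])
  have h2 := pvMain deps PySem.Dict.empty
  have h3 := pvBfold deps deps 0 PySem.Dict.empty (by simp [PySem.Dict.empty, PySem.Dict.keys]) (by simp)
  have hT : pvT deps PySem.Dict.empty = PySem.Dict.empty := rfl
  rw [show ((0 : Nat) : Int) = (0 : Int) from rfl] at h3
  rw [h1, h2, hT, ← h3]
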